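-- pv_equiv track=rewrite | github.com/ZalZarak/RGBD-to-3D-Pose | src/helper.py | generate_base_search_area
-- ===== SOURCE A (Python) =====
-- def generate_base_search_area(deviation: int, skip: int) -> list[tuple[int, int]]:
--     if deviation <= 0 or skip < 0:
--         return []
--     search = []
--     skip += 1
--     deviation = deviation - deviation % skip
--     for i in range(-deviation, deviation + 1, skip):
--         for j in range(-deviation, deviation + 1, skip):
--             search.append((i, j))
--     search.sort(key=lambda a: a[0] ** 2 + a[1] ** 2)
--     # search.pop(0) commented out for validation via color.
--     return search
-- ===== SOURCE B (Python) =====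
-- def generate_base_search_area(deviation: int, skip: int) -> list[tuple[int, int]]:
--     if deviation <= 0 or skip < 0:
--         return []
--     step = skip + 1
--     m = deviation // step
--     sq = [a * a for a in range(-m, m + 1)]
--     maxr = 2 * m * m
--     counts = [0] * (maxr + 1)
--     for sa in sq:
--         for sb in sq:
--             counts[sa + sb] += 1
--     pos = []
--     total = 0
--     for c in counts:
--         pos.append(total)
--         total += c
--     out = [(0, 0)] * total
--     for a in range(-m, m + 1):
--         i = a * step
--         sa = a * a
--         for b in range(-m, m + 1):
--             r = sa + b * b
--             out[pos[r]] = (i, b * step)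
--             pos[r] += 1
--     return out
-- ===== Notes on version B (the rewrite author's own statement) =====
-- stated objective: alternative
-- what changed: Replaces the library comparison sort by a counting sort: one grid pass builds a histogram over the 2*m^2+1 possible squared radii, an exclusive prefix-sum pass assigns each radius its output offset, and a second grid pass scatters each point into its preallocated output slot, reproducing the stable sort's order by construction.
import Mathlib
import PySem

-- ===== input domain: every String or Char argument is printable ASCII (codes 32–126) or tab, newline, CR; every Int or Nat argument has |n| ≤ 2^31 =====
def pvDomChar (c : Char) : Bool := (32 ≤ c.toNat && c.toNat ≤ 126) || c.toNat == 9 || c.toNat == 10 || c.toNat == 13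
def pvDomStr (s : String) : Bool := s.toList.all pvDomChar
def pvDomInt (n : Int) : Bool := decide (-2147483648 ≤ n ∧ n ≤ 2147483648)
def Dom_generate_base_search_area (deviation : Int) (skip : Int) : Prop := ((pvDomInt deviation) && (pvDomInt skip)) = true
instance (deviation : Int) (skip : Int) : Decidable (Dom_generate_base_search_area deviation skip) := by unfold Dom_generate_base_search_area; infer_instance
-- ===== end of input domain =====

-- B replaces the library comparison sort by a counting sort: a histogram of squared
-- radii, an exclusive prefix-sum pass assigning each radius its output offset, and a
-- scatter pass placing each grid point into a preallocated slot. Objective: alternative.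

-- ===== PORT A =====
def generate_base_search_area (deviation : Int) (skip : Int) : List (Int × Int) :=
  if deviation ≤ 0 ∨ skip < 0 then []
  else
    let skip' := skip + 1
    let dev := deviation - PySem.Int.mod deviation skip'
    let search := (PySem.List.pyRange (-dev) (dev + 1) skip').foldl
      (fun acc i => (PySem.List.pyRange (-dev) (dev + 1) skip').foldl
        (fun acc2 j => acc2 ++ [(i, j)]) acc) []
    PySem.List.sorted search (fun a => a.1 ^ 2 + a.2 ^ 2) false

-- ===== PORT B =====
def generate_base_search_area_alt (deviation : Int) (skip : Int) : List (Int × Int) :=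
  if deviation ≤ 0 ∨ skip < 0 then []
  else
    let step := skip + 1
    let m := PySem.Int.floordiv deviation step
    let sq := (PySem.List.pyRange (-m) (m + 1) 1).map (fun a => a * a)
    let maxr := 2 * m * m
    let counts := sq.foldl (fun cs sa => sq.foldl (fun cs2 sb =>
        PySem.List.pySetD cs2 (sa + sb) (PySem.List.pyGetD cs2 (sa + sb) 0 + 1)) cs)
      (List.replicate (maxr + 1).toNat (0 : Int))
    let pt := counts.foldl (fun (pt : List Int × Int) c => (pt.1 ++ [pt.2], pt.2 + c))
      (([] : List Int), (0 : Int))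
    let res := (PySem.List.pyRange (-m) (m + 1) 1).foldl (fun st a =>
        let i := a * step
        let sa := a * a
        (PySem.List.pyRange (-m) (m + 1) 1).foldl (fun st2 b =>
          let r := sa + b * b
          (PySem.List.pySetD st2.1 (PySem.List.pyGetD st2.2 r 0) (i, b * step),
           PySem.List.pySetD st2.2 r (PySem.List.pyGetD st2.2 r 0 + 1))) st)
      (List.replicate pt.2.toNat (((0 : Int), (0 : Int))), pt.1)
    res.1

-- ===== PRECONDITION & SPEC =====
def Spec_generate_base_search_area (deviation : Int) (skip : Int) (out : List (Int × Int)) : Prop := out = generate_base_search_area_alt deviation skip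
instance (deviation : Int) (skip : Int) (out : List (Int × Int)) : Decidable (Spec_generate_base_search_area deviation skip out) := by unfold Spec_generate_base_search_area; infer_instance

-- ===== CLAIM (what is proved, stated in full; the proofs are below) =====
def Claim_equal_generate_base_search_area : Prop := ∀ (deviation : Int) (skip : Int), Dom_generate_base_search_area deviation skip → Spec_generate_base_search_area deviation skip (generate_base_search_area deviation skip)

-- ===== LEMMAS AND PROOFS =====

-- Abbreviations used only by the proofs.
def uRange (m : Int) : List Int := PySem.List.pyRange (-m) (m + 1) 1
def grid (m : Int) : List (Int × Int) :=
  (uRange m).flatMap (fun a => (uRange m).map (fun b => (a, b)))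
def sqKey (q : Int × Int) : Int := q.1 * q.1 + q.2 * q.2
def bucketN (m : Int) (r : Nat) : List (Int × Int) :=
  (grid m).filter (fun q => sqKey q == (r : Int))
def cntN (m : Int) (r : Nat) : Nat := (bucketN m r).length
def startN (m : Int) (r : Nat) : Nat := ((List.range r).map (fun j => cntN m j)).sum
def scatterStep (step : Int) (st : List (Int × Int) × List Int) (q : Int × Int) :
    List (Int × Int) × List Int :=
  (PySem.List.pySetD st.1 (PySem.List.pyGetD st.2 (sqKey q) 0) (q.1 * step, q.2 * step),
   PySem.List.pySetD st.2 (sqKey q) (PySem.List.pyGetD st.2 (sqKey q) 0 + 1))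

-- Nested loop over two index lists is the fold over the row-major product list.
theorem nested_foldl_eq_foldl_product {α β : Type} (xs ys : List α) (g : β → α × α → β) (init : β) :
    xs.foldl (fun a i => ys.foldl (fun a2 j => g a2 (i, j)) a) init
      = (xs.flatMap (fun i => ys.map (fun j => (i, j)))).foldl g init := by
  induction xs generalizing init with
  | nil => rfl
  | cons i xs ih =>
      simp only [List.foldl_cons, List.flatMap_cons, List.foldl_append, List.foldl_map]
      exact ih _

-- insertBy skips a prefix it must not be inserted before.
theorem insertBy_append_left {α : Type} (before : α → α → Bool) (x : α) (l1 l2 : List α)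
    (h : ∀ y ∈ l1, before x y = false) :
    PySem.List.insertBy before x (l1 ++ l2) = l1 ++ PySem.List.insertBy before x l2 := by
  induction l1 with
  | nil => rfl
  | cons y t ih =>
      have hy : before x y = false := h y (by simp)
      simp only [List.cons_append, PySem.List.insertBy, hy]
      simp only [Bool.false_eq_true, if_false, List.cons.injEq, true_and]
      exact ih (fun z hz => h z (by simp [hz]))

-- insertBy puts x in front when it must go before the head (or the list is empty).
theorem insertBy_all_before {α : Type} (before : α → α → Bool) (x : α) (l : List α)
    (h : ∀ y ∈ l, before x y = true) :
    PySem.List.insertBy before x l = x :: l := by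
  cases l with
  | nil => rfl
  | cons y t => simp [PySem.List.insertBy, h y (by simp)]

-- A strictly increasing list splits around any value k.
theorem split_pairwise_lt (ks : List Int) (k : Int) (hp : ks.Pairwise (· < ·)) :
    ∃ l1 l2, (∀ d ∈ l1, d < k) ∧ (∀ d ∈ l2, k < d) ∧
      ((k ∈ ks ∧ ks = l1 ++ k :: l2) ∨ (k ∉ ks ∧ ks = l1 ++ l2)) := by
  induction ks with
  | nil => exact ⟨[], [], by simp, by simp, Or.inr (by simp)⟩
  | cons a t ih =>
      rcases List.pairwise_cons.mp hp with ⟨ha, ht⟩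
      rcases lt_trichotomy a k with hak | hak | hak
      · rcases ih ht with ⟨l1, l2, h1, h2, hsplit⟩
        refine ⟨a :: l1, l2, ?_, h2, ?_⟩
        · intro d hd; rcases List.mem_cons.mp hd with rfl | hd
          · exact hak
          · exact h1 d hd
        · rcases hsplit with ⟨hk, heq⟩ | ⟨hk, heq⟩
          · exact Or.inl ⟨List.mem_cons_of_mem _ hk, by simp [heq]⟩
          · refine Or.inr ⟨?_, by simp [heq]⟩
            intro hmem; rcases List.mem_cons.mp hmem with rfl | hmem
            · exact absurd hak (lt_irrefl _)
            · exact hk hmem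
      · subst hak
        exact ⟨[], t, by simp, ha, Or.inl ⟨List.mem_cons_self, rfl⟩⟩
      · refine ⟨[], a :: t, by simp, ?_, Or.inr ⟨?_, rfl⟩⟩
        · intro d hd; rcases List.mem_cons.mp hd with rfl | hd
          · exact hak
          · exact lt_trans hak (ha d hd)
        · intro hmem; rcases List.mem_cons.mp hmem with rfl | hmem
          · exact absurd hak (lt_irrefl _)
          · exact absurd (ha k hmem) (by omega)

-- Elements of a key-d bucket have key d.
theorem key_of_mem_bucket {α : Type} (key : α → Int) (xs : List α) (d : Int) (y : α)
    (hy : y ∈ xs.filter (fun x => key x == d)) : key y = d := by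
  rcases List.mem_filter.mp hy with ⟨_, h⟩
  exact beq_iff_eq.mp h

-- Python's stable sort equals concatenation of the key buckets taken in
-- ascending order of the distinct keys.
theorem stable_sort_eq_buckets {α : Type} (key : α → Int) (xs : List α) :
    PySem.List.sorted xs key false
      = (PySem.List.sorted (PySem.Set.ofList (xs.map key)) (fun x => x) false).flatMap
          (fun d => xs.filter (fun x => key x == d)) := by
  induction xs using List.reverseRecOn with
  | nil => rfl
  | append_singleton xs x ih =>
      set bf : α → α → Bool := fun a b => decide (key a < key b) with hbf
      have hL : PySem.List.sorted (xs ++ [x]) key false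
          = PySem.List.insertBy bf x (PySem.List.sorted xs key false) := by
        rw [PySem.List.sorted_eq_foldl_insertBy, PySem.List.sorted_eq_foldl_insertBy,
          List.foldl_append]
        rfl
      set S : List Int := PySem.Set.ofList (xs.map key) with hS
      set ks : List Int := PySem.List.sorted S (fun x => x) false with hks
      have hSnew : PySem.Set.ofList ((xs ++ [x]).map key) = PySem.Set.add S (key x) := by
        rw [hS, List.map_append, PySem.Set.ofList, PySem.Set.ofList, List.foldl_append]
        rfl
      have hpairs : ks.Pairwise (· < ·) := by
        rw [hks, hS]; exact PySem.List.sorted_ofList_pairwise_lt (xs.map key)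
      have hmemks : ∀ d : Int, d ∈ ks ↔ d ∈ xs.map key := by
        intro d
        rw [hks, PySem.List.mem_sorted, hS, PySem.Set.mem_ofList]
      obtain ⟨l1, l2, h1, h2, hsplit⟩ := split_pairwise_lt ks (key x) hpairs
      have hbucket_new : ∀ d : Int,
          (xs ++ [x]).filter (fun y => key y == d)
            = xs.filter (fun y => key y == d) ++ (if key x = d then [x] else []) := by
        intro d
        rw [List.filter_append]
        congr 1
        by_cases h : key x = d <;> simp [h]
      have hfalse1 : ∀ y ∈ (l1 ++ [key x]).flatMap (fun d => xs.filter (fun z => key z == d)),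
          bf x y = false := by
        intro y hy
        rcases List.mem_flatMap.mp hy with ⟨d, hd, hyd⟩
        have hkey := key_of_mem_bucket key xs d y hyd
        rcases List.mem_append.mp hd with hd | hd
        · have := h1 d hd
          simp [hbf, hkey]; omega
        · simp at hd; subst hd
          simp [hbf, hkey]
      have htrue2 : ∀ y ∈ l2.flatMap (fun d => xs.filter (fun z => key z == d)),
          bf x y = true := by
        intro y hy
        rcases List.mem_flatMap.mp hy with ⟨d, hd, hyd⟩
        have hkey := key_of_mem_bucket key xs d y hyd
        have := h2 d hd
        simp [hbf, hkey]; omega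
      rcases hsplit with ⟨hmem, heq⟩ | ⟨hmem, heq⟩
      · have hmemS : key x ∈ S := by
          rw [hS]; exact (PySem.Set.mem_ofList (xs.map key) (key x)).mpr ((hmemks (key x)).mp hmem)
        have hSadd : PySem.Set.add S (key x) = S := by
          simp [PySem.Set.add, hmemS]
        rw [hL, ih, hSnew, hSadd, ← hks, heq]
        have hflat : (l1 ++ key x :: l2).flatMap (fun d => xs.filter (fun z => key z == d))
            = (l1 ++ [key x]).flatMap (fun d => xs.filter (fun z => key z == d))
              ++ l2.flatMap (fun d => xs.filter (fun z => key z == d)) := by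
          simp [List.flatMap_append]
        rw [hflat, insertBy_append_left bf x _ _ hfalse1, insertBy_all_before bf x _ htrue2]
        simp only [List.flatMap_append, List.flatMap_cons, hbucket_new]
        have hl1 : l1.flatMap (fun d => xs.filter (fun y => key y == d)
              ++ (if key x = d then [x] else []))
            = l1.flatMap (fun d => xs.filter (fun y => key y == d)) := by
          apply List.flatMap_congr
          intro d hd
          have : key x ≠ d := by have := h1 d hd; omega
          simp [this]
        have hl2 : l2.flatMap (fun d => xs.filter (fun y => key y == d)
              ++ (if key x = d then [x] else []))
            = l2.flatMap (fun d => xs.filter (fun y => key y == d)) := by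
          apply List.flatMap_congr
          intro d hd
          have : key x ≠ d := by have := h2 d hd; omega
          simp [this]
        rw [hl1, hl2]
        simp
      · have hmemS : key x ∉ S := by
          rw [hS]
          intro hc
          exact hmem ((hmemks (key x)).mpr ((PySem.Set.mem_ofList (xs.map key) (key x)).mp hc))
        have hSadd : PySem.Set.add S (key x) = S ++ [key x] := by
          simp [PySem.Set.add, hmemS]
        have hks' : PySem.List.sorted (S ++ [key x]) (fun x => x) false
            = PySem.List.insertBy (fun a b : Int => decide (a < b)) (key x) ks := by
          rw [hks, PySem.List.sorted_eq_foldl_insertBy, PySem.List.sorted_eq_foldl_insertBy,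
            List.foldl_append]
          rfl
        have hinsks : PySem.List.insertBy (fun a b : Int => decide (a < b)) (key x) ks
            = l1 ++ key x :: l2 := by
          rw [heq, insertBy_append_left _ _ _ _ (by intro d hd; have := h1 d hd; simp; omega),
            insertBy_all_before _ _ _ (by intro d hd; simp; exact h2 d hd)]
        have hempty : xs.filter (fun y => key y == key x) = [] := by
          rw [List.filter_eq_nil_iff]
          intro y hy hkey
          have : key y = key x := beq_iff_eq.mp hkey
          exact hmem ((hmemks (key x)).mpr (this ▸ List.mem_map_of_mem hy))
        rw [hL, ih, hSnew, hSadd, hks', hinsks, heq]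
        have hfalse1' : ∀ y ∈ l1.flatMap (fun d => xs.filter (fun z => key z == d)),
            bf x y = false := by
          intro y hy
          rcases List.mem_flatMap.mp hy with ⟨d, hd, hyd⟩
          have hkey := key_of_mem_bucket key xs d y hyd
          have := h1 d hd
          simp [hbf, hkey]; omega
        rw [List.flatMap_append, insertBy_append_left bf x _ _ hfalse1',
          insertBy_all_before bf x _ htrue2]
        simp only [List.flatMap_append, List.flatMap_cons, hbucket_new]
        have hl1 : l1.flatMap (fun d => xs.filter (fun y => key y == d)
              ++ (if key x = d then [x] else []))
            = l1.flatMap (fun d => xs.filter (fun y => key y == d)) := by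
          apply List.flatMap_congr
          intro d hd
          have : key x ≠ d := by have := h1 d hd; omega
          simp [this]
        have hl2 : l2.flatMap (fun d => xs.filter (fun y => key y == d)
              ++ (if key x = d then [x] else []))
            = l2.flatMap (fun d => xs.filter (fun y => key y == d)) := by
          apply List.flatMap_congr
          intro d hd
          have : key x ≠ d := by have := h2 d hd; omega
          simp [this]
        rw [hl1, hl2, hempty]
        simp

-- Two strictly increasing integer lists with the same members are equal.
theorem eq_of_pairwise_lt_ext (l1 l2 : List Int) (h1 : l1.Pairwise (· < ·))
    (h2 : l2.Pairwise (· < ·)) (h : ∀ x, x ∈ l1 ↔ x ∈ l2) : l1 = l2 := by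
  have n1 : l1.Nodup := h1.imp (fun hlt => ne_of_lt hlt)
  have n2 : l2.Nodup := h2.imp (fun hlt => ne_of_lt hlt)
  exact List.Perm.eq_of_pairwise
    (fun a b _ _ hab hba => absurd hba (not_lt_of_ge (le_of_lt hab)))
    h1 h2 ((List.perm_ext_iff_of_nodup n1 n2).mpr h)

-- insertBy commutes with mapping when the comparator factors through the map.
theorem insertBy_map {α β : Type} (f : α → β) (bf : β → β → Bool) (x : α) (l : List α) :
    PySem.List.insertBy bf (f x) (l.map f)
      = (PySem.List.insertBy (fun a b => bf (f a) (f b)) x l).map f := by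
  induction l with
  | nil => rfl
  | cons y t ih =>
      simp only [List.map_cons, PySem.List.insertBy]
      by_cases h : bf (f x) (f y) = true
      · simp [h]
      · simp only [h]
        simp only [Bool.not_eq_true] at h
        simp [ih]

-- Sorting a mapped list is mapping the list sorted by the composed key.
theorem sorted_map_key {α β κ : Type} [LT κ] [DecidableLT κ] (f : α → β) (key : β → κ)
    (xs : List α) :
    PySem.List.sorted (xs.map f) key false
      = (PySem.List.sorted xs (fun x => key (f x)) false).map f := by
  rw [PySem.List.sorted_eq_foldl_insertBy, PySem.List.sorted_eq_foldl_insertBy]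
  have : ∀ (l : List α) (acc : List α),
      (l.map f).foldl
        (fun acc x => PySem.List.insertBy (fun a b => decide (key a < key b)) x acc) (acc.map f)
      = (l.foldl (fun acc x =>
          PySem.List.insertBy (fun a b => decide (key (f a) < key (f b))) x acc) acc).map f := by
    intro l
    induction l with
    | nil => intro acc; rfl
    | cons y t ih =>
        intro acc
        simp only [List.map_cons, List.foldl_cons]
        rw [insertBy_map f (fun a b => decide (key a < key b)) y acc]
        exact ih _
  exact this xs []

-- Sorting is unchanged under a key with the same strict comparisons.
theorem sorted_key_congr {α κ : Type} [LT κ] [DecidableLT κ] (key key' : α → κ) (xs : List α)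
    (h : ∀ a b, key a < key b ↔ key' a < key' b) :
    PySem.List.sorted xs key false = PySem.List.sorted xs key' false := by
  rw [PySem.List.sorted_eq_foldl_insertBy, PySem.List.sorted_eq_foldl_insertBy]
  have : (fun (a b : α) => decide (key a < key b))
      = (fun (a b : α) => decide (key' a < key' b)) := by
    funext a b
    exact decide_eq_decide.mpr (h a b)
  rw [this]

-- The square-root table: get? returns exactly the nonnegative root ≤ m.
-- Scaled ticks: range(-dev, dev+1, step) with dev = m*step is the unit range scaled.
theorem ticks_eq_map (m step : Int) (hstep : 0 < step) (hm : 0 ≤ m) :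
    PySem.List.pyRange (-(m * step)) (m * step + 1) step = (uRange m).map (· * step) := by
  have hms : 0 ≤ m * step := mul_nonneg hm (le_of_lt hstep)
  rw [PySem.List.pyRange_of_pos _ _ hstep, uRange, PySem.List.pyRange_one, List.map_map]
  have hcond : (-(m * step) < m * step + 1) := by omega
  rw [if_pos hcond]
  have hnum : m * step + 1 - -(m * step) + step - 1 = (2 * m + 1) * step := by ring
  rw [hnum, Int.mul_ediv_cancel _ (ne_of_gt hstep)]
  have hcount : (m + 1 - -m) = 2 * m + 1 := by ring
  rw [hcount]
  apply List.map_congr_left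
  intro k _
  simp only [Function.comp]
  ring

-- Keys of grid points are within [0, 2m²].
theorem sqKey_mem_bounds (m : Int) (q : Int × Int) (hq : q ∈ grid m) :
    0 ≤ sqKey q ∧ sqKey q < 2 * m * m + 1 := by
  unfold grid uRange at hq
  rw [List.mem_flatMap] at hq
  obtain ⟨a, ha, hq⟩ := hq
  rw [List.mem_map] at hq
  obtain ⟨b, hb, rfl⟩ := hq
  have ha' := PySem.List.mem_pyRange_one.mp ha
  have hb' := PySem.List.mem_pyRange_one.mp hb
  unfold sqKey
  constructor
  · exact add_nonneg (mul_self_nonneg _) (mul_self_nonneg _)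
  · simp only
    nlinarith [mul_self_nonneg (m - a), mul_self_nonneg (m + a),
      mul_self_nonneg (m - b), mul_self_nonneg (m + b)]

-- Scanning a superset of radii in increasing order visits the same nonempty buckets.
theorem flatMap_sub_pairwise (rs ks : List Int) (g : Int → List (Int × Int))
    (hks : ∀ k ∈ ks, k ∈ rs) (hrs : rs.Pairwise (· < ·)) (hkp : ks.Pairwise (· < ·))
    (hg : ∀ r ∈ rs, r ∉ ks → g r = []) : rs.flatMap g = ks.flatMap g := by
  have h1 : rs.flatMap g = (rs.filter (fun r => decide (r ∈ ks))).flatMap g := by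
    clear hks hrs hkp
    induction rs with
    | nil => rfl
    | cons r t ih =>
        rw [List.flatMap_cons, List.filter_cons]
        by_cases hr : r ∈ ks
        · rw [if_pos (by simpa), List.flatMap_cons,
            ih (fun x hx hnx => hg x (List.mem_cons_of_mem _ hx) hnx)]
        · rw [if_neg (by simpa), hg r List.mem_cons_self hr, List.nil_append,
            ih (fun x hx hnx => hg x (List.mem_cons_of_mem _ hx) hnx)]
  have h2 : rs.filter (fun r => decide (r ∈ ks)) = ks := by
    apply eq_of_pairwise_lt_ext _ _ (hrs.filter _) hkp
    intro x
    simp only [List.mem_filter, decide_eq_true_eq]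
    exact ⟨fun h => h.2, fun h => ⟨hks x h, h⟩⟩
  rw [h1, h2]

-- Sorting a mapped list by a key equals mapping the list sorted by an equivalent key.
theorem sorted_map_key' {α β : Type} (f : α → β) (key : β → Int) (key' : α → Int)
    (xs : List α) (h : ∀ a b : α, key (f a) < key (f b) ↔ key' a < key' b) :
    PySem.List.sorted (xs.map f) key false = (PySem.List.sorted xs key' false).map f := by
  rw [sorted_map_key f key xs, sorted_key_congr (fun x => key (f x)) key' xs h]

-- Bucket offsets: partial sums of the bucket sizes.
theorem startN_succ (m : Int) (r : Nat) : startN m (r + 1) = startN m r + cntN m r := by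
  unfold startN
  rw [List.range_succ, List.map_append, List.sum_append]
  simp

theorem startN_mono (m : Int) {r r' : Nat} (h : r ≤ r') : startN m r ≤ startN m r' := by
  induction r' with
  | zero =>
      have h0 : r = 0 := Nat.le_zero.mp h
      subst h0
      exact Nat.le_refl _
  | succ n ih =>
      rcases Nat.lt_or_ge r (n + 1) with hlt | hge
      · exact le_trans (ih (by omega)) (by rw [startN_succ]; omega)
      · have h1 : r = n + 1 := by omega
        subst h1
        exact Nat.le_refl _

theorem startN_bound (m : Int) {r n : Nat} (h : r < n) :
    startN m r + cntN m r ≤ startN m n := by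
  have := startN_mono m (r' := n) (r := r + 1) (by omega)
  rw [startN_succ] at this
  omega

-- cntN is the count of grid points with the given squared radius.
theorem cntN_eq_countP (m : Int) (r : Nat) :
    cntN m r = (grid m).countP (fun q => sqKey q == (r : Int)) := by
  unfold cntN bucketN
  rw [List.countP_eq_length_filter]

-- getD after set, total form.
theorem getD_set' {α : Type} (l : List α) (i r : Nat) (v d : α) (hr : r < l.length) :
    (l.set i v).getD r d = if i = r then v else l.getD r d := by
  rw [List.getD_eq_getElem _ _ (by simpa using hr), List.getElem_set]
  split
  · rfl
  · rw [List.getD_eq_getElem _ _ hr]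

-- Phase 1: the histogram loop adds each element's key multiplicity.
theorem bump_foldl (l : List (Int × Int)) :
    ∀ cs : List Int, (∀ q ∈ l, 0 ≤ sqKey q ∧ sqKey q < (cs.length : Int)) →
    ((l.foldl (fun cs2 q =>
        PySem.List.pySetD cs2 (sqKey q) (PySem.List.pyGetD cs2 (sqKey q) 0 + 1)) cs).length
        = cs.length
    ∧ ∀ r : Nat, r < cs.length →
      (l.foldl (fun cs2 q =>
        PySem.List.pySetD cs2 (sqKey q) (PySem.List.pyGetD cs2 (sqKey q) 0 + 1)) cs).getD r 0
        = cs.getD r 0 + (l.countP (fun q => sqKey q == (r : Int)) : Int)) := by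
  induction l with
  | nil =>
      intro cs _
      exact ⟨rfl, fun r _ => by simp⟩
  | cons q t ih =>
      intro cs h
      obtain ⟨hq0, hqlt⟩ := h q (by simp)
      have hqn : (sqKey q).toNat < cs.length := by omega
      have hset : PySem.List.pySetD cs (sqKey q) (PySem.List.pyGetD cs (sqKey q) 0 + 1)
          = cs.set (sqKey q).toNat (cs.getD (sqKey q).toNat 0 + 1) := by
        rw [PySem.List.pySetD_of_nonneg _ _ hq0, PySem.List.pyGetD_of_nonneg _ _ hq0]
      obtain ⟨ihlen, ihval⟩ := ih (cs.set (sqKey q).toNat (cs.getD (sqKey q).toNat 0 + 1))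
        (by
          intro p hp
          have := h p (by simp [hp])
          simpa using this)
      constructor
      · simp only [List.foldl_cons, hset]
        rw [ihlen, List.length_set]
      · intro r hr
        simp only [List.foldl_cons, hset]
        rw [ihval r (by simpa using hr), getD_set' _ _ _ _ _ hr]
        by_cases hk : (sqKey q).toNat = r
        · have hkey : (sqKey q == (r : Int)) = true := by
            rw [beq_iff_eq]
            omega
          have hcp : (q :: t).countP (fun w => sqKey w == (r : Int))
              = t.countP (fun w => sqKey w == (r : Int)) + 1 :=
            List.countP_cons_of_pos hkey
          rw [if_pos hk, hcp, hk]
          push_cast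
          ring
        · have hkey : (sqKey q == (r : Int)) = false := by
            rw [beq_eq_false_iff_ne]
            omega
          have hcp : (q :: t).countP (fun w => sqKey w == (r : Int))
              = t.countP (fun w => sqKey w == (r : Int)) :=
            List.countP_cons_of_neg (by simp [hkey])
          rw [if_neg hk, hcp]

-- Phase 2: the prefix-sum loop produces the exclusive partial sums and the total.
theorem prefix_foldl (cs : List Int) :
    ∀ (acc : List Int) (t : Int),
    cs.foldl (fun (pt : List Int × Int) c => (pt.1 ++ [pt.2], pt.2 + c)) (acc, t)
      = (acc ++ (List.range cs.length).map (fun k => t + (cs.take k).sum), t + cs.sum) := by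
  induction cs with
  | nil => intro acc t; simp
  | cons c cs ih =>
      intro acc t
      simp only [List.foldl_cons]
      rw [ih (acc ++ [t]) (t + c)]
      refine Prod.ext ?_ ?_
      · rw [List.length_cons, List.range_succ_eq_map, List.map_cons, List.map_map,
          List.append_assoc, List.singleton_append]
        simp only [List.take_zero, List.sum_nil, add_zero, Function.comp_def,
          List.take_succ_cons, List.sum_cons]
        congr 1
        congr 1
        apply List.map_congr_left
        intro k _
        ring
      · rw [List.sum_cons]
        ring

-- Indexing a flatMap over an initial segment of the naturals.
theorem sum_range_prefix_le (f : Nat → Nat) {r n : Nat} (h : r < n) :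
    ((List.range r).map f).sum + f r ≤ ((List.range n).map f).sum := by
  induction n with
  | zero => omega
  | succ k ih =>
      rw [List.range_succ, List.map_append, List.sum_append]
      rcases Nat.lt_or_ge r k with hlt | hge
      · have := ih hlt
        simp
        omega
      · have : r = k := by omega
        subst this
        simp
  
theorem flatMap_range_getD {α : Type} (d : α) (g : Nat → List α) :
    ∀ (n r k : Nat), r < n → k < (g r).length →
    ((List.range n).flatMap g).getD (((List.range r).map (fun j => (g j).length)).sum + k) d
      = (g r).getD k d := by
  intro n
  induction n with
  | zero => intro r k hr _; omega
  | succ nn ih =>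
      intro r k hr hk
      rw [List.range_succ, List.flatMap_append]
      rcases Nat.lt_or_ge r nn with hlt | hge
      · have hpre : ((List.range r).map (fun j => (g j).length)).sum + (g r).length
            ≤ ((List.range nn).map (fun j => (g j).length)).sum :=
          sum_range_prefix_le (fun j => (g j).length) hlt
        have hidx : ((List.range r).map (fun j => (g j).length)).sum + k
            < ((List.range nn).flatMap g).length := by
          rw [List.length_flatMap]
          omega
        rw [List.getD_append _ _ _ _ hidx]
        exact ih r k hlt hk
      · have hre : r = nn := by omega
        subst hre
        have hlen : ((List.range r).flatMap g).length
            = ((List.range r).map (fun j => (g j).length)).sum := List.length_flatMap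
        rw [List.getD_append_right _ _ _ _ (by rw [hlen]; exact Nat.le_add_right _ _)]
        rw [hlen, Nat.add_sub_cancel_left]
        simp only [List.flatMap_cons, List.flatMap_nil, List.append_nil]

-- Decomposing an index below the total into a bucket and an offset.
theorem decomp_range_sum (f : Nat → Nat) :
    ∀ (n idx : Nat), idx < ((List.range n).map f).sum →
    ∃ r k, r < n ∧ k < f r ∧ idx = ((List.range r).map f).sum + k := by
  intro n
  induction n with
  | zero => intro idx h; simp at h
  | succ nn ih =>
      intro idx h
      rcases Nat.lt_or_ge idx ((List.range nn).map f).sum with hlt | hge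
      · obtain ⟨r, k, h1, h2, h3⟩ := ih idx hlt
        exact ⟨r, k, by omega, h2, h3⟩
      · refine ⟨nn, idx - ((List.range nn).map f).sum, by omega, ?_, by omega⟩
        rw [List.range_succ, List.map_append, List.sum_append] at h
        simp at h
        omega

-- Phase 3: the scatter loop fills each bucket's segment with its points in order.
theorem scatter_invariant (m step : Int) :
    ∀ (l P : List (Int × Int)), grid m = P ++ l →
    ∀ (o : List (Int × Int)) (p : List Int),
    o.length = startN m (2 * m * m + 1).toNat →
    p.length = (2 * m * m + 1).toNat →
    (∀ r : Nat, r < (2 * m * m + 1).toNat →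
        p.getD r 0 = (startN m r : Int) + (P.countP (fun q => sqKey q == (r : Int)) : Int)) →
    (∀ r k : Nat, r < (2 * m * m + 1).toNat → k < P.countP (fun q => sqKey q == (r : Int)) →
        o.getD (startN m r + k) (0, 0)
          = (((bucketN m r).getD k (0, 0)).1 * step, ((bucketN m r).getD k (0, 0)).2 * step)) →
    ((l.foldl (scatterStep step) (o, p)).1.length = startN m (2 * m * m + 1).toNat
    ∧ ∀ r k : Nat, r < (2 * m * m + 1).toNat →
        k < (P ++ l).countP (fun q => sqKey q == (r : Int)) →
        (l.foldl (scatterStep step) (o, p)).1.getD (startN m r + k) (0, 0)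
          = (((bucketN m r).getD k (0, 0)).1 * step, ((bucketN m r).getD k (0, 0)).2 * step)) := by
  intro l
  induction l with
  | nil =>
      intro P _ o p hol _ _ ho
      exact ⟨hol, fun r k hr hk => ho r k hr (by simpa using hk)⟩
  | cons q t ih =>
      intro P hsplit o p hol hpl hp ho
      have hqmem : q ∈ grid m := by
        rw [hsplit]
        simp
      obtain ⟨hq0, hqlt⟩ := sqKey_mem_bounds m q hqmem
      have hLpos : (0 : Int) < 2 * m * m + 1 := by omega
      set Ln : Nat := (2 * m * m + 1).toNat with hLn
      have hr0n : (sqKey q).toNat < Ln := by omega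
      have hr0cast : (((sqKey q).toNat : Nat) : Int) = sqKey q := by omega
      set r0 : Nat := (sqKey q).toNat with hr0def
      set c : Nat := P.countP (fun w => sqKey w == (r0 : Int)) with hc
      -- the prefix count is strictly below the bucket size
      have hkeyq : (sqKey q == ((r0 : Nat) : Int)) = true := by
        rw [beq_iff_eq]
        omega
      have hcnt_split : cntN m r0 = c + (1 + t.countP (fun w => sqKey w == (r0 : Int))) := by
        rw [cntN_eq_countP, hsplit, List.countP_append, List.countP_cons, hkeyq]
        simp [hc]
        omega
      have hclt : c < cntN m r0 := by omega
      -- the write index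
      have hidx : PySem.List.pyGetD p (sqKey q) 0 = ((startN m r0 + c : Nat) : Int) := by
        rw [PySem.List.pyGetD_of_nonneg _ _ hq0]
        rw [← hr0def, hp r0 hr0n]
        push_cast
        ring
      have hiNlt : startN m r0 + c < startN m Ln := by
        have := startN_bound m hr0n
        omega
      -- one scatter step in set/getD form
      have hstep1 : (scatterStep step (o, p) q).1
          = o.set (startN m r0 + c) (q.1 * step, q.2 * step) := by
        unfold scatterStep
        rw [hidx, PySem.List.pySetD_of_nonneg _ _ (by positivity)]
        congr 1
      have hstep2 : (scatterStep step (o, p) q).2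
          = p.set r0 (((startN m r0 + c : Nat) : Int) + 1) := by
        unfold scatterStep
        rw [hidx, PySem.List.pySetD_of_nonneg _ _ hq0, ← hr0def]
      have hsplit' : grid m = (P ++ [q]) ++ t := by
        rw [hsplit, List.append_assoc]
        rfl
      have hcountPpos : (P ++ [q]).countP (fun w => sqKey w == (r0 : Int))
          = P.countP (fun w => sqKey w == (r0 : Int)) + 1 := by
        rw [List.countP_append]
        simp [hkeyq]
      have hcountPneg : ∀ r : Nat, r0 ≠ r →
          (P ++ [q]).countP (fun w => sqKey w == (r : Int))
            = P.countP (fun w => sqKey w == (r : Int)) := by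
        intro r hrr
        rw [List.countP_append]
        have hf : (sqKey q == (r : Int)) = false := by
          rw [beq_eq_false_iff_ne]
          omega
        simp [hf]
      -- apply the induction hypothesis to the advanced state
      have hmain := ih (P ++ [q]) hsplit'
        (o.set (startN m r0 + c) (q.1 * step, q.2 * step))
        (p.set r0 (((startN m r0 + c : Nat) : Int) + 1))
        (by rw [List.length_set]; exact hol)
        (by rw [List.length_set]; exact hpl)
        (by
          intro r hr
          rw [getD_set' _ _ _ _ _ (by omega : r < p.length)]
          by_cases hrr : r0 = r
          · subst hrr
            rw [if_pos rfl, hcountPpos]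
            push_cast
            omega
          · rw [if_neg hrr, hcountPneg r hrr, hp r hr])
        (by
          intro r k hr hk
          by_cases hrr : r0 = r
          · subst hrr
            rw [hcountPpos] at hk
            by_cases hkc : k = c
            · subst hkc
              rw [getD_set' _ _ _ _ _ (by omega : startN m r0 + c < o.length), if_pos rfl]
              -- the bucket's k-th element is q itself
              have hbq : (bucketN m r0).getD c (0, 0) = q := by
                unfold bucketN
                have hfq : (q :: t).filter (fun w => sqKey w == ((r0 : Nat) : Int))
                    = q :: t.filter (fun w => sqKey w == ((r0 : Nat) : Int)) :=
                  List.filter_cons_of_pos hkeyq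
                rw [hsplit, List.filter_append, hfq]
                have hlenP : (P.filter (fun w => sqKey w == ((r0 : Nat) : Int))).length = c := by
                  rw [← List.countP_eq_length_filter]
                rw [List.getD_eq_getElem _ _ (by
                  simp only [List.length_append, List.length_cons]
                  omega)]
                rw [List.getElem_append]
                rw [dif_neg (by omega)]
                simp [hlenP]
              rw [hbq]
            · have hklt : k < c := by omega
              rw [getD_set' _ _ _ _ _ (by omega : startN m r0 + k < o.length),
                if_neg (by omega)]
              exact ho r0 k hr hklt
          · rw [hcountPneg r hrr] at hk
            have hkcnt : k < cntN m r := by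
              have hsub : P.Sublist (grid m) := by
                rw [hsplit]
                exact (List.sublist_append_left _ _)
              have := List.Sublist.countP_le (p := fun w => sqKey w == (r : Int)) hsub
              rw [← cntN_eq_countP] at this
              omega
            have hne : startN m r0 + c ≠ startN m r + k := by
              rcases Nat.lt_or_ge r0 r with hlt | hge
              · have h1 := startN_bound m hlt
                omega
              · have hlt : r < r0 := by omega
                have h1 := startN_bound m hlt
                omega
            rw [getD_set' _ _ _ _ _ (by
                have h1 := startN_bound m hr
                have h2 := startN_mono m (Nat.le_of_lt hr)
                omega : startN m r + k < o.length),
              if_neg hne]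
            exact ho r k hr hk)
      -- repackage
      simp only [List.foldl_cons]
      rw [show (scatterStep step) (o, p) q
          = (o.set (startN m r0 + c) (q.1 * step, q.2 * step),
             p.set r0 (((startN m r0 + c : Nat) : Int) + 1)) from
        Prod.ext hstep1 hstep2]
      refine ⟨hmain.1, ?_⟩
      intro r k hr hk
      refine hmain.2 r k hr ?_
      rw [List.append_assoc]
      simpa using hk

-- Nested loop with both indices free, as the fold over the row-major product list.
theorem nested_foldl_eq_foldl_product2 {β : Type} (xs ys : List Int) (g : β → Int → Int → β)
    (init : β) :
    xs.foldl (fun st a => ys.foldl (fun st2 b => g st2 a b) st) init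
      = (xs.flatMap (fun a => ys.map (fun b => (a, b)))).foldl (fun st p => g st p.1 p.2) init := by
  induction xs generalizing init with
  | nil => rfl
  | cons a xs ih =>
      simp only [List.foldl_cons, List.flatMap_cons, List.foldl_append, List.foldl_map]
      exact ih _

-- The two ports agree in the non-trivial branch.
theorem ports_agree_core (step m : Int) (hstep : 0 < step) (hm : 0 ≤ m) :
    PySem.List.sorted
        ((PySem.List.pyRange (-(m * step)) (m * step + 1) step).foldl
          (fun acc i => (PySem.List.pyRange (-(m * step)) (m * step + 1) step).foldl
            (fun acc2 j => acc2 ++ [(i, j)]) acc) [])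
        (fun a : Int × Int => a.1 ^ 2 + a.2 ^ 2) false
      = ((PySem.List.pyRange (-m) (m + 1) 1).foldl (fun st a =>
          (PySem.List.pyRange (-m) (m + 1) 1).foldl (fun st2 b =>
            (PySem.List.pySetD st2.1 (PySem.List.pyGetD st2.2 (a * a + b * b) 0)
              (a * step, b * step),
             PySem.List.pySetD st2.2 (a * a + b * b)
              (PySem.List.pyGetD st2.2 (a * a + b * b) 0 + 1))) st)
          (List.replicate (((((PySem.List.pyRange (-m) (m + 1) 1).map (fun a => a * a)).foldl (fun cs sa => ((PySem.List.pyRange (-m) (m + 1) 1).map (fun a => a * a)).foldl (fun cs2 sb =>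
        PySem.List.pySetD cs2 (sa + sb) (PySem.List.pyGetD cs2 (sa + sb) 0 + 1)) cs)
      (List.replicate (2 * m * m + 1).toNat (0 : Int))).foldl (fun (pt : List Int × Int) c => (pt.1 ++ [pt.2], pt.2 + c))
      (([] : List Int), (0 : Int)))).2.toNat (((0 : Int), (0 : Int))), (((((PySem.List.pyRange (-m) (m + 1) 1).map (fun a => a * a)).foldl (fun cs sa => ((PySem.List.pyRange (-m) (m + 1) 1).map (fun a => a * a)).foldl (fun cs2 sb =>
        PySem.List.pySetD cs2 (sa + sb) (PySem.List.pyGetD cs2 (sa + sb) 0 + 1)) cs)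
      (List.replicate (2 * m * m + 1).toNat (0 : Int))).foldl (fun (pt : List Int × Int) c => (pt.1 ++ [pt.2], pt.2 + c))
      (([] : List Int), (0 : Int)))).1)).1 := by
  have hA : PySem.List.sorted
        ((PySem.List.pyRange (-(m * step)) (m * step + 1) step).foldl
          (fun acc i => (PySem.List.pyRange (-(m * step)) (m * step + 1) step).foldl
            (fun acc2 j => acc2 ++ [(i, j)]) acc) [])
        (fun a : Int × Int => a.1 ^ 2 + a.2 ^ 2) false
      = ((PySem.List.sorted (PySem.Set.ofList ((grid m).map sqKey)) (fun x => x) false).flatMap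
          (fun d => (grid m).filter (fun x => sqKey x == d))).map
            (fun q : Int × Int => (q.1 * step, q.2 * step)) := by
    rw [nested_foldl_eq_foldl_product _ _ (fun a p => a ++ [p]) [],
      PySem.List.foldl_append_singleton_eq_self, List.nil_append,
      ticks_eq_map m step hstep hm, List.flatMap_map]
    have hpts : List.flatMap
        (fun a => List.map (fun j => (a * step, j)) (List.map (· * step) (uRange m))) (uRange m)
        = (grid m).map (fun q : Int × Int => (q.1 * step, q.2 * step)) := by
      unfold grid
      rw [List.map_flatMap]
      apply List.flatMap_congr
      intro a _
      rw [List.map_map, List.map_map]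
      rfl
    rw [hpts,
      sorted_map_key' (fun q : Int × Int => (q.1 * step, q.2 * step))
        (fun a : Int × Int => a.1 ^ 2 + a.2 ^ 2) sqKey (grid m) ?_,
      stable_sort_eq_buckets sqKey (grid m)]
    intro p q
    show (p.1 * step) ^ 2 + (p.2 * step) ^ 2 < (q.1 * step) ^ 2 + (q.2 * step) ^ 2
      ↔ sqKey p < sqKey q
    have e : ∀ w : Int × Int, (w.1 * step) ^ 2 + (w.2 * step) ^ 2 = step ^ 2 * sqKey w := by
      intro w
      unfold sqKey
      ring
    have hs2 : (0 : Int) < step ^ 2 := by positivity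
    rw [e p, e q]
    exact ⟨fun h' => lt_of_mul_lt_mul_left h' (le_of_lt hs2), fun h' => by nlinarith⟩
  -- Phase 1: the histogram loop is a fold of key bumps over the grid.
  have e1 : (((PySem.List.pyRange (-m) (m + 1) 1).map (fun a => a * a)).foldl (fun cs sa => ((PySem.List.pyRange (-m) (m + 1) 1).map (fun a => a * a)).foldl (fun cs2 sb =>
        PySem.List.pySetD cs2 (sa + sb) (PySem.List.pyGetD cs2 (sa + sb) 0 + 1)) cs)
      (List.replicate (2 * m * m + 1).toNat (0 : Int)))
      = (grid m).foldl (fun (cs2 : List Int) (q : Int × Int) => PySem.List.pySetD cs2 (sqKey q) (PySem.List.pyGetD cs2 (sqKey q) 0 + 1)) (List.replicate (2 * m * m + 1).toNat (0 : Int)) := by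
    rw [nested_foldl_eq_foldl_product2 ((PySem.List.pyRange (-m) (m + 1) 1).map (fun a => a * a)) ((PySem.List.pyRange (-m) (m + 1) 1).map (fun a => a * a))
      (fun cs2 x y => PySem.List.pySetD cs2 (x + y) (PySem.List.pyGetD cs2 (x + y) 0 + 1)) _]
    have hprod : List.flatMap (fun x => List.map (fun y => (x, y)) ((PySem.List.pyRange (-m) (m + 1) 1).map (fun a => a * a))) ((PySem.List.pyRange (-m) (m + 1) 1).map (fun a => a * a))
        = (grid m).map (fun q : Int × Int => (q.1 * q.1, q.2 * q.2)) := by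
      rw [List.flatMap_map]
      unfold grid
      rw [List.map_flatMap]
      apply List.flatMap_congr
      intro a _
      rw [List.map_map, List.map_map]
      rfl
    rw [hprod, List.foldl_map]
    rfl
  have hbounds : ∀ q ∈ grid m, 0 ≤ sqKey q
      ∧ sqKey q < ((List.replicate (2 * m * m + 1).toNat (0 : Int)).length : Int) := by
    intro q hq
    have h1 := sqKey_mem_bounds m q hq
    have h2 : (0 : Int) ≤ 2 * m * m := by nlinarith
    rw [List.length_replicate]
    omega
  obtain ⟨hclen, hcval⟩ := bump_foldl (grid m)
    (List.replicate (2 * m * m + 1).toNat (0 : Int)) hbounds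
  have hcounts_eq : (grid m).foldl (fun (cs2 : List Int) (q : Int × Int) => PySem.List.pySetD cs2 (sqKey q) (PySem.List.pyGetD cs2 (sqKey q) 0 + 1)) (List.replicate (2 * m * m + 1).toNat (0 : Int))
      = (List.range (2 * m * m + 1).toNat).map (fun j => ((cntN m j : Nat) : Int)) := by
    apply List.ext_getElem
    · rw [hclen, List.length_replicate, List.length_map, List.length_range]
    · intro i h1 h2
      rw [List.length_map, List.length_range] at h2
      have hi : i < (List.replicate (2 * m * m + 1).toNat (0 : Int)).length := by
        rw [List.length_replicate]
        exact h2
      rw [← List.getD_eq_getElem _ 0 h1]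
      rw [hcval i hi, List.getD_replicate _ (by simpa using hi)]
      rw [List.getElem_map, List.getElem_range, cntN_eq_countP]
      simp
  -- Phase 2: the prefix-sum pass yields the bucket offsets and the total.
  have e2 : ((((PySem.List.pyRange (-m) (m + 1) 1).map (fun a => a * a)).foldl (fun cs sa => ((PySem.List.pyRange (-m) (m + 1) 1).map (fun a => a * a)).foldl (fun cs2 sb =>
        PySem.List.pySetD cs2 (sa + sb) (PySem.List.pyGetD cs2 (sa + sb) 0 + 1)) cs)
      (List.replicate (2 * m * m + 1).toNat (0 : Int))).foldl (fun (pt : List Int × Int) c => (pt.1 ++ [pt.2], pt.2 + c))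
      (([] : List Int), (0 : Int)))
      = ((List.range (2 * m * m + 1).toNat).map (fun k => ((startN m k : Nat) : Int)),
        ((startN m (2 * m * m + 1).toNat : Nat) : Int)) := by
    rw [e1, hcounts_eq, prefix_foldl _ [] 0, List.nil_append]
    have hlen : ((List.range (2 * m * m + 1).toNat).map
        (fun j => ((cntN m j : Nat) : Int))).length = (2 * m * m + 1).toNat := by
      rw [List.length_map, List.length_range]
    refine Prod.ext ?_ ?_
    · show List.map _ (List.range (((List.range (2 * m * m + 1).toNat).map
          (fun j => ((cntN m j : Nat) : Int))).length)) = _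
      rw [hlen]
      apply List.map_congr_left
      intro k hk
      rw [List.mem_range] at hk
      rw [← List.map_take, List.take_range, Nat.min_eq_left (le_of_lt hk), zero_add]
      unfold startN cntN
      rw [Nat.cast_list_sum, List.map_map]
      rfl
    · show (0 : Int) + _ = _
      rw [zero_add]
      unfold startN cntN
      rw [Nat.cast_list_sum, List.map_map]
      rfl
  -- Phase 3: the scatter pass is a fold of scatter steps over the grid.
  have e3 : ((PySem.List.pyRange (-m) (m + 1) 1).foldl (fun st a =>
          (PySem.List.pyRange (-m) (m + 1) 1).foldl (fun st2 b =>
            (PySem.List.pySetD st2.1 (PySem.List.pyGetD st2.2 (a * a + b * b) 0)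
              (a * step, b * step),
             PySem.List.pySetD st2.2 (a * a + b * b)
              (PySem.List.pyGetD st2.2 (a * a + b * b) 0 + 1))) st)
          (List.replicate (((((PySem.List.pyRange (-m) (m + 1) 1).map (fun a => a * a)).foldl (fun cs sa => ((PySem.List.pyRange (-m) (m + 1) 1).map (fun a => a * a)).foldl (fun cs2 sb =>
        PySem.List.pySetD cs2 (sa + sb) (PySem.List.pyGetD cs2 (sa + sb) 0 + 1)) cs)
      (List.replicate (2 * m * m + 1).toNat (0 : Int))).foldl (fun (pt : List Int × Int) c => (pt.1 ++ [pt.2], pt.2 + c))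
      (([] : List Int), (0 : Int)))).2.toNat (((0 : Int), (0 : Int))), (((((PySem.List.pyRange (-m) (m + 1) 1).map (fun a => a * a)).foldl (fun cs sa => ((PySem.List.pyRange (-m) (m + 1) 1).map (fun a => a * a)).foldl (fun cs2 sb =>
        PySem.List.pySetD cs2 (sa + sb) (PySem.List.pyGetD cs2 (sa + sb) 0 + 1)) cs)
      (List.replicate (2 * m * m + 1).toNat (0 : Int))).foldl (fun (pt : List Int × Int) c => (pt.1 ++ [pt.2], pt.2 + c))
      (([] : List Int), (0 : Int)))).1))
      = (grid m).foldl (scatterStep step)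
          (List.replicate (((((PySem.List.pyRange (-m) (m + 1) 1).map (fun a => a * a)).foldl (fun cs sa => ((PySem.List.pyRange (-m) (m + 1) 1).map (fun a => a * a)).foldl (fun cs2 sb =>
        PySem.List.pySetD cs2 (sa + sb) (PySem.List.pyGetD cs2 (sa + sb) 0 + 1)) cs)
      (List.replicate (2 * m * m + 1).toNat (0 : Int))).foldl (fun (pt : List Int × Int) c => (pt.1 ++ [pt.2], pt.2 + c))
      (([] : List Int), (0 : Int)))).2.toNat (((0 : Int), (0 : Int))), (((((PySem.List.pyRange (-m) (m + 1) 1).map (fun a => a * a)).foldl (fun cs sa => ((PySem.List.pyRange (-m) (m + 1) 1).map (fun a => a * a)).foldl (fun cs2 sb =>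
        PySem.List.pySetD cs2 (sa + sb) (PySem.List.pyGetD cs2 (sa + sb) 0 + 1)) cs)
      (List.replicate (2 * m * m + 1).toNat (0 : Int))).foldl (fun (pt : List Int × Int) c => (pt.1 ++ [pt.2], pt.2 + c))
      (([] : List Int), (0 : Int)))).1) := by
    rw [nested_foldl_eq_foldl_product2 (PySem.List.pyRange (-m) (m + 1) 1) (PySem.List.pyRange (-m) (m + 1) 1)
      (fun st2 x y =>
        (PySem.List.pySetD st2.1 (PySem.List.pyGetD st2.2 (x * x + y * y) 0)
          (x * step, y * step),
         PySem.List.pySetD st2.2 (x * x + y * y)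
          (PySem.List.pyGetD st2.2 (x * x + y * y) 0 + 1))) _]
    rfl
  have htot : (((((PySem.List.pyRange (-m) (m + 1) 1).map (fun a => a * a)).foldl (fun cs sa => ((PySem.List.pyRange (-m) (m + 1) 1).map (fun a => a * a)).foldl (fun cs2 sb =>
        PySem.List.pySetD cs2 (sa + sb) (PySem.List.pyGetD cs2 (sa + sb) 0 + 1)) cs)
      (List.replicate (2 * m * m + 1).toNat (0 : Int))).foldl (fun (pt : List Int × Int) c => (pt.1 ++ [pt.2], pt.2 + c))
      (([] : List Int), (0 : Int)))).2.toNat = startN m (2 * m * m + 1).toNat := by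
    rw [e2]
    rfl
  have hposlen : (((((PySem.List.pyRange (-m) (m + 1) 1).map (fun a => a * a)).foldl (fun cs sa => ((PySem.List.pyRange (-m) (m + 1) 1).map (fun a => a * a)).foldl (fun cs2 sb =>
        PySem.List.pySetD cs2 (sa + sb) (PySem.List.pyGetD cs2 (sa + sb) 0 + 1)) cs)
      (List.replicate (2 * m * m + 1).toNat (0 : Int))).foldl (fun (pt : List Int × Int) c => (pt.1 ++ [pt.2], pt.2 + c))
      (([] : List Int), (0 : Int)))).1.length = (2 * m * m + 1).toNat := by
    rw [e2]
    dsimp only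
    rw [List.length_map, List.length_range]
  have hposval : ∀ r : Nat, r < (2 * m * m + 1).toNat →
      (((((PySem.List.pyRange (-m) (m + 1) 1).map (fun a => a * a)).foldl (fun cs sa => ((PySem.List.pyRange (-m) (m + 1) 1).map (fun a => a * a)).foldl (fun cs2 sb =>
        PySem.List.pySetD cs2 (sa + sb) (PySem.List.pyGetD cs2 (sa + sb) 0 + 1)) cs)
      (List.replicate (2 * m * m + 1).toNat (0 : Int))).foldl (fun (pt : List Int × Int) c => (pt.1 ++ [pt.2], pt.2 + c))
      (([] : List Int), (0 : Int)))).1.getD r 0 = ((startN m r : Nat) : Int)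
        + ((([] : List (Int × Int)).countP (fun q => sqKey q == (r : Int)) : Nat) : Int) := by
    intro r hr
    rw [e2]
    dsimp only
    simp only [List.countP_nil, Nat.cast_zero, add_zero]
    rw [List.getD_eq_getElem _ 0 (by rw [List.length_map, List.length_range]; exact hr),
      List.getElem_map, List.getElem_range]
  obtain ⟨hreslen, hresval⟩ := scatter_invariant m step (grid m) [] rfl
    (List.replicate (((((PySem.List.pyRange (-m) (m + 1) 1).map (fun a => a * a)).foldl (fun cs sa => ((PySem.List.pyRange (-m) (m + 1) 1).map (fun a => a * a)).foldl (fun cs2 sb =>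
        PySem.List.pySetD cs2 (sa + sb) (PySem.List.pyGetD cs2 (sa + sb) 0 + 1)) cs)
      (List.replicate (2 * m * m + 1).toNat (0 : Int))).foldl (fun (pt : List Int × Int) c => (pt.1 ++ [pt.2], pt.2 + c))
      (([] : List Int), (0 : Int)))).2.toNat (((0 : Int), (0 : Int)))) ((((((PySem.List.pyRange (-m) (m + 1) 1).map (fun a => a * a)).foldl (fun cs sa => ((PySem.List.pyRange (-m) (m + 1) 1).map (fun a => a * a)).foldl (fun cs2 sb =>
        PySem.List.pySetD cs2 (sa + sb) (PySem.List.pyGetD cs2 (sa + sb) 0 + 1)) cs)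
      (List.replicate (2 * m * m + 1).toNat (0 : Int))).foldl (fun (pt : List Int × Int) c => (pt.1 ++ [pt.2], pt.2 + c))
      (([] : List Int), (0 : Int)))).1)
    (by rw [List.length_replicate, htot])
    hposlen
    hposval
    (by intro r k _ hk; simp at hk)
  -- The scattered output is the concatenation of the buckets in radius order.
  have hfin : ((grid m).foldl (scatterStep step)
        (List.replicate (((((PySem.List.pyRange (-m) (m + 1) 1).map (fun a => a * a)).foldl (fun cs sa => ((PySem.List.pyRange (-m) (m + 1) 1).map (fun a => a * a)).foldl (fun cs2 sb =>
        PySem.List.pySetD cs2 (sa + sb) (PySem.List.pyGetD cs2 (sa + sb) 0 + 1)) cs)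
      (List.replicate (2 * m * m + 1).toNat (0 : Int))).foldl (fun (pt : List Int × Int) c => (pt.1 ++ [pt.2], pt.2 + c))
      (([] : List Int), (0 : Int)))).2.toNat (((0 : Int), (0 : Int))), (((((PySem.List.pyRange (-m) (m + 1) 1).map (fun a => a * a)).foldl (fun cs sa => ((PySem.List.pyRange (-m) (m + 1) 1).map (fun a => a * a)).foldl (fun cs2 sb =>
        PySem.List.pySetD cs2 (sa + sb) (PySem.List.pyGetD cs2 (sa + sb) 0 + 1)) cs)
      (List.replicate (2 * m * m + 1).toNat (0 : Int))).foldl (fun (pt : List Int × Int) c => (pt.1 ++ [pt.2], pt.2 + c))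
      (([] : List Int), (0 : Int)))).1)).1
      = ((PySem.List.pyRange 0 (2 * m * m + 1) 1).flatMap
          (fun d => (grid m).filter (fun x => sqKey x == d))).map
            (fun q : Int × Int => (q.1 * step, q.2 * step)) := by
    have hrs : (PySem.List.pyRange 0 (2 * m * m + 1) 1).flatMap
        (fun d => (grid m).filter (fun x => sqKey x == d))
        = (List.range (2 * m * m + 1).toNat).flatMap (fun j => bucketN m j) := by
      rw [PySem.List.pyRange_one, List.flatMap_map, sub_zero]
      apply List.flatMap_congr
      intro j _
      unfold bucketN
      simp only [zero_add]
    rw [hrs]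
    apply List.ext_getElem
    · rw [hreslen, List.length_map, List.length_flatMap]
      rfl
    · intro i h1 h2
      rw [hreslen] at h1
      obtain ⟨r, k, hrn, hkc, hidx⟩ := decomp_range_sum (fun j => cntN m j)
        ((2 * m * m + 1).toNat) i h1
      subst hidx
      have hb : ((List.range r).map (fun j => cntN m j)).sum + k
          < ((List.range (2 * m * m + 1).toNat).flatMap (fun j => bucketN m j)).length := by
        rw [List.length_flatMap]
        exact h1
      have h2' := flatMap_range_getD ((0 : Int), (0 : Int)) (fun j => bucketN m j)
        ((2 * m * m + 1).toNat) r k hrn hkc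
      have h2e : ((List.range (2 * m * m + 1).toNat).flatMap (fun j => bucketN m j))[
          ((List.range r).map (fun j => cntN m j)).sum + k]'hb
          = (bucketN m r).getD k ((0 : Int), (0 : Int)) := by
        rw [← List.getD_eq_getElem _ ((0 : Int), (0 : Int)) hb]
        exact h2'
      have hlt1 : ((List.range r).map (fun j => cntN m j)).sum + k
          < ((grid m).foldl (scatterStep step)
              (List.replicate (((((PySem.List.pyRange (-m) (m + 1) 1).map (fun a => a * a)).foldl (fun cs sa => ((PySem.List.pyRange (-m) (m + 1) 1).map (fun a => a * a)).foldl (fun cs2 sb =>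
        PySem.List.pySetD cs2 (sa + sb) (PySem.List.pyGetD cs2 (sa + sb) 0 + 1)) cs)
      (List.replicate (2 * m * m + 1).toNat (0 : Int))).foldl (fun (pt : List Int × Int) c => (pt.1 ++ [pt.2], pt.2 + c))
      (([] : List Int), (0 : Int)))).2.toNat (((0 : Int), (0 : Int))), (((((PySem.List.pyRange (-m) (m + 1) 1).map (fun a => a * a)).foldl (fun cs sa => ((PySem.List.pyRange (-m) (m + 1) 1).map (fun a => a * a)).foldl (fun cs2 sb =>
        PySem.List.pySetD cs2 (sa + sb) (PySem.List.pyGetD cs2 (sa + sb) 0 + 1)) cs)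
      (List.replicate (2 * m * m + 1).toNat (0 : Int))).foldl (fun (pt : List Int × Int) c => (pt.1 ++ [pt.2], pt.2 + c))
      (([] : List Int), (0 : Int)))).1)).1.length := by
        rw [hreslen]
        exact h1
      have hsum : ((List.range r).map (fun j => cntN m j)).sum = startN m r := rfl
      have hval := hresval r k hrn (by
        rw [List.nil_append, ← cntN_eq_countP]
        exact hkc)
      rw [List.getElem_map, h2e, ← List.getD_eq_getElem _ ((0 : Int), (0 : Int)) hlt1,
        hsum, hval]
  rw [hA, e3, hfin]
  refine congrArg _ ?_
  refine (flatMap_sub_pairwise (PySem.List.pyRange 0 (2 * m * m + 1) 1)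
    (PySem.List.sorted (PySem.Set.ofList ((grid m).map sqKey)) (fun x => x) false)
    _ ?_ (PySem.List.pairwise_lt_pyRange_one _ _)
    (PySem.List.sorted_ofList_pairwise_lt _) ?_).symm
  · intro d hd
    rw [PySem.List.mem_sorted, PySem.Set.mem_ofList, List.mem_map] at hd
    obtain ⟨q, hq, rfl⟩ := hd
    have := sqKey_mem_bounds m q hq
    exact PySem.List.mem_pyRange_one.mpr ⟨this.1, this.2⟩
  · intro r _ hr
    rw [PySem.List.mem_sorted, PySem.Set.mem_ofList] at hr
    rw [List.filter_eq_nil_iff]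
    intro q hq hqr
    exact hr (List.mem_map.mpr ⟨q, hq, beq_iff_eq.mp hqr⟩)


-- ===== VERDICT (by name: the statement is the Claim_ definition above) =====
theorem generate_base_search_area_spec : Claim_equal_generate_base_search_area := by
  intro deviation skip _
  unfold Spec_generate_base_search_area generate_base_search_area generate_base_search_area_alt
  by_cases hguard : deviation ≤ 0 ∨ skip < 0
  · simp [hguard]
  · simp only [hguard, if_false]
    have hd : 0 < deviation := by omega
    have hs : 0 ≤ skip := by omega
    have hstep : 0 < skip + 1 := by omega
    have hm : 0 ≤ PySem.Int.floordiv deviation (skip + 1) := by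
      rw [PySem.Int.floordiv_eq_ediv_of_pos hstep]
      exact Int.ediv_nonneg (by omega) (by omega)
    have hdev : deviation - PySem.Int.mod deviation (skip + 1)
        = PySem.Int.floordiv deviation (skip + 1) * (skip + 1) := by
      have := PySem.Int.floordiv_mul_add_mod deviation (skip + 1)
      omega
    rw [hdev]
    exact ports_agree_core (skip + 1) (PySem.Int.floordiv deviation (skip + 1)) hstep hm
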